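-- pv_equiv track=rewrite | github.com/sykwon/sigmod2025like | src/util.py | pattern_gen
-- ===== SOURCE A (Python) =====
-- def pattern_gen3(sentences, pat_type="sub", max_len=None, **kwargs):
--     patterns = set()
--     word_tuples = set()
--     for sentence in sentences:
--         words = sentence.split()
--         for i in range(len(words)):
--             for j in range(i + 1, len(words)):
--                 word_tuples.add((words[i], words[j]))
--
--     for words in word_tuples:
--         word1, word2 = words
--         for i in range(len(word1)):
--             for j in range(i + 1, len(word1) + 1):
--                 for k in range(len(word2)):
--                     for l in range(k + 1, len(word2) + 1):
--                         if (j - i) + (l - k) + 3 > max_len: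
--                             continue
--                         pattern = "%" + word1[i:j] + "%" + word2[k:l] + "%"
--                         patterns.add(pattern)
--     patterns = list(sorted(patterns))
--     return patterns
--
-- def pattern_gen(sentences, pat_type, n_pat=1, max_len=None, **kwargs):
--     if n_pat == 2:
--         assert pat_type == "sub"
--         return pattern_gen3(sentences, "sub", max_len)
--     patterns = set()
--
--     strings = set()
--     for sentence in sentences:
--         words = sentence.split()
--         for word in words:
--             strings.add(word)
--
--     if pat_type == "sub":
--         for string in strings:
--             for i in range(len(string)):
--                 for j in range(i + 1, len(string) + 1):
--                     if max_len is not None: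
--                         if (j - i) > max_len:
--                             continue
--                     pat = "%" + string[i:j] + "%"
--                     patterns.add(pat)
--     elif pat_type == "prf":
--         for string in strings:
--             for i in range(1, len(string) + 1):
--                 if max_len is not None:
--                     if i > max_len:
--                         continue
--                 pat = string[:i] + "%"
--                 patterns.add(pat)
--     elif pat_type == "suf":
--         for string in strings:
--             for i in range(1, len(string) + 1):
--                 if max_len is not None:
--                     if i > max_len:
--                         continue
--                 pat = "%" + string[-i:]
--                 patterns.add(pat)
--     patterns = list(sorted(patterns))
--     return patterns
-- ===== SOURCE B (Python) =====
-- # B: duplicate-tolerant streaming generation + sort-then-dedup pipeline: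
-- # cores are built by char-by-char accumulation over suffixes with a length
-- # *truncation* (break) instead of index-pair loops with a filter; no sets are
-- # maintained during generation -- everything goes into one list and is
-- # deduplicated at the end by sorting and dict.fromkeys.
--
-- def _prefs(w, cap):
--     # nonempty prefixes of w of length <= cap (cap None = unbounded),
--     # built incrementally; break exploits that prefix lengths increase
--     out = []
--     acc = ""
--     for ch in w:
--         acc += ch
--         if cap is not None and len(acc) > cap:
--             break
--         out.append(acc)
--     return out
--
-- def _subs(w, cap):
--     # substrings = prefixes of each suffix
--     out = []
--     suf = w
--     while suf:
--         out.extend(_prefs(suf, cap))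
--         suf = suf[1:]
--     return out
--
-- def _sufs(w, cap):
--     # nonempty suffixes of length <= cap, grown right-to-left
--     out = []
--     acc = ""
--     for ch in reversed(w):
--         acc = ch + acc
--         if cap is not None and len(acc) > cap:
--             break
--         out.append(acc)
--     return out
--
-- def _uniq_sorted(lst):
--     return list(dict.fromkeys(sorted(lst)))
--
-- def pattern_gen(sentences, pat_type, n_pat=1, max_len=None, **kwargs):
--     if n_pat == 2:
--         assert pat_type == "sub"
--         pats = []
--         for sentence in sentences:
--             ws = sentence.split()
--             for i, w1 in enumerate(ws):
--                 for w2 in ws[i + 1:]: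
--                     cap1 = max_len - 4  # at least "%s1%c%" needs len(s1)+4
--                     for s1 in _subs(w1, cap1):
--                         for s2 in _subs(w2, max_len - 3 - len(s1)):
--                             pats.append("%" + s1 + "%" + s2 + "%")
--         return _uniq_sorted(pats)
--     pats = []
--     for sentence in sentences:
--         for w in sentence.split():
--             if pat_type == "sub":
--                 pats.extend("%" + c + "%" for c in _subs(w, max_len))
--             elif pat_type == "prf":
--                 pats.extend(p + "%" for p in _prefs(w, max_len))
--             elif pat_type == "suf":
--                 pats.extend("%" + s for s in _sufs(w, max_len))
--     return _uniq_sorted(pats)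
-- ===== Notes on version B (the rewrite author's own statement) =====
-- stated objective: alternative
-- what changed: Generation is redone as streaming char-by-char accumulation: cores are grown incrementally over the suffix decomposition with a length-cap that truncates (break) instead of index-pair loops with a filter, the two-word branch derives separate caps (max_len-4, max_len-3-len(s1)) arithmetically instead of one combined four-deep filter, and no sets are kept during generation - duplicates go into one flat list that is deduplicated at the end by sort + dict.fromkeys.
import Mathlib
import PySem

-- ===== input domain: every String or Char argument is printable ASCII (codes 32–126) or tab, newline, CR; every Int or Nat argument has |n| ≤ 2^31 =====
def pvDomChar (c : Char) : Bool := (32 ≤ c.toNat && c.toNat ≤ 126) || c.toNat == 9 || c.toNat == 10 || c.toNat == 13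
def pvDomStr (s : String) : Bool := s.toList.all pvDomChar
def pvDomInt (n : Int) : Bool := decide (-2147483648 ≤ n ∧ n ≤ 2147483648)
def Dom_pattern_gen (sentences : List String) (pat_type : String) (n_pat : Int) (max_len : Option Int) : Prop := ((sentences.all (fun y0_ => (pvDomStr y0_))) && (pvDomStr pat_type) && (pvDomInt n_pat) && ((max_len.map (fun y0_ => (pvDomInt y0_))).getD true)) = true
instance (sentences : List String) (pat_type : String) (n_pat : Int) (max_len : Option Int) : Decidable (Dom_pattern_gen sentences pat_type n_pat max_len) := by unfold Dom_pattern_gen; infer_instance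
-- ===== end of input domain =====

-- B regenerates the cores by incremental char accumulation over the suffix decomposition with
-- truncating length caps and dedups once at the end (sort + dict.fromkeys); return values proved
-- equal on Pre_ (A raises AssertionError/TypeError outside Pre_).


-- ===== PORT A =====
-- Python's '(j-i)+(l-k)+3 > max_len' with max_len possibly None: the none branch raises
-- TypeError in Python and is excluded by Pre_; on inputs admitted by Pre_ with max_len = none
-- the loops reaching this comparison are empty, so the none value below is never observable.
def pvGtOpt (v : Int) (m? : Option Int) : Bool :=
  match m? with
  | none => true
  | some m => decide (m < v)

-- Python's 'if max_len is not None: if v > max_len: continue' (no raise possible)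
def pvCapSkip (v : Int) (m? : Option Int) : Bool :=
  match m? with
  | none => false
  | some m => decide (m < v)

-- A: the word_tuples set (nested index loops adding pairs)
def pvTuplesA (sentences : List String) : PySem.Set (String × String) :=
  sentences.foldl (fun wt sentence =>
    (PySem.List.pyRange 0 (PySem.Str.split₀ sentence).length 1).foldl (fun wt i =>
      (PySem.List.pyRange (i+1) (PySem.Str.split₀ sentence).length 1).foldl (fun wt j =>
        PySem.Set.add wt (PySem.List.pyGetD (PySem.Str.split₀ sentence) i "",
                          PySem.List.pyGetD (PySem.Str.split₀ sentence) j "")) wt) wt)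
    PySem.Set.empty

-- A: the four nested index loops of pattern_gen3 over the tuple set
def pvPat3A (word_tuples : PySem.Set (String × String)) (max_len : Option Int) : PySem.Set String :=
  word_tuples.foldl (fun pats wp =>
    (PySem.List.pyRange 0 (PySem.Str.len wp.1) 1).foldl (fun pats i =>
      (PySem.List.pyRange (i+1) ((PySem.Str.len wp.1 : Int) + 1) 1).foldl (fun pats j =>
        (PySem.List.pyRange 0 (PySem.Str.len wp.2) 1).foldl (fun pats k =>
          (PySem.List.pyRange (k+1) ((PySem.Str.len wp.2 : Int) + 1) 1).foldl (fun pats l =>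
            if pvGtOpt ((j - i) + (l - k) + 3) max_len then pats
            else PySem.Set.add pats
              ("%" ++ PySem.Str.slice wp.1 (some i) (some j) ++ "%" ++
               PySem.Str.slice wp.2 (some k) (some l) ++ "%")) pats) pats) pats) pats)
    PySem.Set.empty

def pattern_gen3 (sentences : List String) (max_len : Option Int) : List String :=
  PySem.List.sorted (pvPat3A (pvTuplesA sentences) max_len) (fun x => x) false

-- A: the word set of the single-pattern branches
def pvStringsA (sentences : List String) : PySem.Set String :=
  sentences.foldl (fun st sentence =>
    (PySem.Str.split₀ sentence).foldl (fun st word => PySem.Set.add st word) st)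
    PySem.Set.empty

def pvSubA (strings : PySem.Set String) (max_len : Option Int) : PySem.Set String :=
  strings.foldl (fun pats s =>
    (PySem.List.pyRange 0 (PySem.Str.len s) 1).foldl (fun pats i =>
      (PySem.List.pyRange (i+1) ((PySem.Str.len s : Int) + 1) 1).foldl (fun pats j =>
        if pvCapSkip (j - i) max_len then pats
        else PySem.Set.add pats ("%" ++ PySem.Str.slice s (some i) (some j) ++ "%")) pats) pats)
    PySem.Set.empty

def pvPrfA (strings : PySem.Set String) (max_len : Option Int) : PySem.Set String :=
  strings.foldl (fun pats s =>
    (PySem.List.pyRange 1 ((PySem.Str.len s : Int) + 1) 1).foldl (fun pats i =>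
      if pvCapSkip i max_len then pats
      else PySem.Set.add pats (PySem.Str.slice s none (some i) ++ "%")) pats)
    PySem.Set.empty

def pvSufA (strings : PySem.Set String) (max_len : Option Int) : PySem.Set String :=
  strings.foldl (fun pats s =>
    (PySem.List.pyRange 1 ((PySem.Str.len s : Int) + 1) 1).foldl (fun pats i =>
      if pvCapSkip i max_len then pats
      else PySem.Set.add pats ("%" ++ PySem.Str.slice s (some (-i)) none)) pats)
    PySem.Set.empty

def pattern_gen (sentences : List String) (pat_type : String) (n_pat : Int) (max_len : Option Int) : List String :=
  if n_pat = 2 then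
    -- 'assert pat_type == "sub"': the failing case raises AssertionError, excluded by Pre_
    pattern_gen3 sentences max_len
  else
    PySem.List.sorted
      (if pat_type = "sub" then pvSubA (pvStringsA sentences) max_len
       else if pat_type = "prf" then pvPrfA (pvStringsA sentences) max_len
       else if pat_type = "suf" then pvSufA (pvStringsA sentences) max_len
       else PySem.Set.empty)
      (fun x => x) false

-- ===== PORT B =====
-- B's 'cap is not None and len(acc) > cap' (no raise possible)
def pvOver (v : Int) (cap : Option Int) : Bool :=
  match cap with
  | none => false
  | some m => decide (m < v)

-- _prefs: prefixes grown char by char (Python str accumulation, exact as List Char), break on cap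
def pvPrefsB (cap : Option Int) : List Char → List Char → List (List Char)
  | _acc, [] => []
  | acc, c :: rest =>
    if pvOver ((acc.length : Int) + 1) cap then []
    else (acc ++ [c]) :: pvPrefsB cap (acc ++ [c]) rest

-- _subs: prefixes of each suffix (the 'while suf: ...; suf = suf[1:]' loop)
def pvSubsB (cap : Option Int) : List Char → List (List Char)
  | [] => []
  | c :: rest => pvPrefsB cap [] (c :: rest) ++ pvSubsB cap rest

-- _sufs: suffixes grown right-to-left over reversed(w), break on cap
def pvSufsB (cap : Option Int) : List Char → List Char → List (List Char)
  | _acc, [] => []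
  | acc, c :: rest =>
    if pvOver ((acc.length : Int) + 1) cap then []
    else (c :: acc) :: pvSufsB cap (c :: acc) rest

-- _uniq_sorted: list(dict.fromkeys(sorted(lst)))
def pvUniqSorted (lst : List String) : List String :=
  PySem.List.dedup (PySem.List.sorted lst (fun x => x) false)

-- B, n_pat == 2 branch: 'max_len - 4' / 'max_len - 3 - len(s1)' raise TypeError in Python when
-- max_len is None (excluded by Pre_ whenever a pair exists); the Option.map below is never
-- observable under Pre_ since then no pair exists.
def pvPatsPairB (sentences : List String) (max_len : Option Int) : List String :=
  sentences.flatMap (fun sentence =>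
    (PySem.List.enumerate (PySem.Str.split₀ sentence) 0).flatMap (fun iw =>
      (PySem.List.slice (PySem.Str.split₀ sentence) (some (iw.1 + 1)) none).flatMap (fun w2 =>
        (pvSubsB (max_len.map (fun m => m - 4)) iw.2.toList).flatMap (fun s1 =>
          (pvSubsB (max_len.map (fun m => m - 3 - (s1.length : Int))) w2.toList).map (fun s2 =>
            "%" ++ String.ofList s1 ++ "%" ++ String.ofList s2 ++ "%")))))

-- B, single-pattern branches: one flat duplicate-bearing list over word occurrences
def pvPatsSingleB (sentences : List String) (pat_type : String) (max_len : Option Int) : List String :=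
  sentences.flatMap (fun sentence =>
    (PySem.Str.split₀ sentence).flatMap (fun w =>
      if pat_type = "sub" then (pvSubsB max_len w.toList).map (fun c => "%" ++ String.ofList c ++ "%")
      else if pat_type = "prf" then (pvPrefsB max_len [] w.toList).map (fun p => String.ofList p ++ "%")
      else if pat_type = "suf" then (pvSufsB max_len [] w.toList.reverse).map (fun s => "%" ++ String.ofList s)
      else []))

def pattern_gen_alt (sentences : List String) (pat_type : String) (n_pat : Int) (max_len : Option Int) : List String :=
  if n_pat = 2 then pvUniqSorted (pvPatsPairB sentences max_len)
  else pvUniqSorted (pvPatsSingleB sentences pat_type max_len)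

-- ===== PRECONDITION & SPEC =====
-- Pre_ excludes exactly the inputs where the Python A raises: n_pat == 2 with pat_type ≠ "sub"
-- (AssertionError), and n_pat == 2 with max_len None while some sentence has ≥ 2 words
-- (TypeError: '>' between int and NoneType).
def Pre_pattern_gen (sentences : List String) (pat_type : String) (n_pat : Int) (max_len : Option Int) : Prop :=
  n_pat = 2 → (pat_type = "sub" ∧ (max_len = none → ∀ s ∈ sentences, (PySem.Str.split₀ s).length ≤ 1))
instance (sentences : List String) (pat_type : String) (n_pat : Int) (max_len : Option Int) : Decidable (Pre_pattern_gen sentences pat_type n_pat max_len) := by unfold Pre_pattern_gen; infer_instance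

def pvWitness_pattern_gen : List String × String × Int × Option Int := (["ab cd", "x"], "sub", 2, some 5)

def Spec_pattern_gen (sentences : List String) (pat_type : String) (n_pat : Int) (max_len : Option Int) (out : List String) : Prop := out = pattern_gen_alt sentences pat_type n_pat max_len
instance (sentences : List String) (pat_type : String) (n_pat : Int) (max_len : Option Int) (out : List String) : Decidable (Spec_pattern_gen sentences pat_type n_pat max_len out) := by unfold Spec_pattern_gen; infer_instance

-- ===== CLAIM (what is proved, stated in full; the proofs are below) =====
def Claim_equal_pattern_gen : Prop := ∀ (sentences : List String) (pat_type : String) (n_pat : Int) (max_len : Option Int), Dom_pattern_gen sentences pat_type n_pat max_len → Pre_pattern_gen sentences pat_type n_pat max_len → Spec_pattern_gen sentences pat_type n_pat max_len (pattern_gen sentences pat_type n_pat max_len)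

-- ===== LEMMAS AND PROOFS =====

-- generic: membership through a foldl whose step adds exactly the elements satisfying Q
theorem pv_mem_foldl {α β : Type} (Q : α → β → Prop) (g : List β → α → List β)
    (hg : ∀ s a x, x ∈ g s a ↔ x ∈ s ∨ Q a x) (l : List α) (s : List β) (x : β) :
    x ∈ l.foldl g s ↔ x ∈ s ∨ ∃ a ∈ l, Q a x := by
  induction l generalizing s with
  | nil => simp
  | cons a t ih =>
    rw [List.foldl_cons, ih]
    simp only [hg, List.mem_cons]
    constructor
    · rintro (((h | h) | ⟨b, hb, hq⟩))
      · exact Or.inl h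
      · exact Or.inr ⟨a, Or.inl rfl, h⟩
      · exact Or.inr ⟨b, Or.inr hb, hq⟩
    · rintro (h | ⟨b, (rfl | hb), hq⟩)
      · exact Or.inl (Or.inl h)
      · exact Or.inl (Or.inr hq)
      · exact Or.inr ⟨b, hb, hq⟩

-- generic: a foldl whose step preserves Nodup preserves Nodup
theorem pv_nodup_foldl {α β : Type} (g : List β → α → List β)
    (hg : ∀ s a, s.Nodup → (g s a).Nodup) (l : List α) (s : List β) (hs : s.Nodup) :
    (l.foldl g s).Nodup := by
  induction l generalizing s with
  | nil => exact hs
  | cons a t ih => exact ih (g s a) (hg s a hs)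

theorem pv_mem_if_skip {β : Type} [BEq β] [LawfulBEq β] (c : Bool) (s : List β) (y x : β) :
    x ∈ (if c then s else PySem.Set.add s y) ↔ x ∈ s ∨ (c = false ∧ x = y) := by
  cases c <;> simp [PySem.Set.mem_add]

theorem pv_nodup_if_skip {β : Type} [BEq β] [LawfulBEq β] (c : Bool) (s : List β) (y : β)
    (hs : s.Nodup) : (if c then s else PySem.Set.add s y).Nodup := by
  cases c
  · exact PySem.Set.nodup_add s y hs
  · exact hs

-- the canonical membership predicates the A-side sets reduce to
def pvWordIn (sentences : List String) (w : String) : Prop :=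
  ∃ sen ∈ sentences, w ∈ PySem.Str.split₀ sen

def pvPairCond (sen : String) (p : String × String) : Prop :=
  ∃ i ∈ PySem.List.pyRange 0 (PySem.Str.split₀ sen).length 1,
    ∃ j ∈ PySem.List.pyRange (i+1) (PySem.Str.split₀ sen).length 1,
      p = (PySem.List.pyGetD (PySem.Str.split₀ sen) i "",
           PySem.List.pyGetD (PySem.Str.split₀ sen) j "")

def pvSubPat (mx : Option Int) (w x : String) : Prop :=
  ∃ i ∈ PySem.List.pyRange 0 (PySem.Str.len w) 1,
    ∃ j ∈ PySem.List.pyRange (i+1) (PySem.Str.len w + 1) 1,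
      pvCapSkip (j - i) mx = false ∧ x = "%" ++ PySem.Str.slice w (some i) (some j) ++ "%"

def pvPrfPat (mx : Option Int) (w x : String) : Prop :=
  ∃ i ∈ PySem.List.pyRange 1 (PySem.Str.len w + 1) 1,
    pvCapSkip i mx = false ∧ x = PySem.Str.slice w none (some i) ++ "%"

def pvSufPat (mx : Option Int) (w x : String) : Prop :=
  ∃ i ∈ PySem.List.pyRange 1 (PySem.Str.len w + 1) 1,
    pvCapSkip i mx = false ∧ x = "%" ++ PySem.Str.slice w (some (-i)) none

def pvPairPat (mx : Option Int) (wp : String × String) (x : String) : Prop :=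
  ∃ i ∈ PySem.List.pyRange 0 (PySem.Str.len wp.1) 1,
    ∃ j ∈ PySem.List.pyRange (i+1) (PySem.Str.len wp.1 + 1) 1,
      ∃ k ∈ PySem.List.pyRange 0 (PySem.Str.len wp.2) 1,
        ∃ l ∈ PySem.List.pyRange (k+1) (PySem.Str.len wp.2 + 1) 1,
          pvGtOpt ((j - i) + (l - k) + 3) mx = false ∧
            x = "%" ++ PySem.Str.slice wp.1 (some i) (some j) ++ "%" ++
                 PySem.Str.slice wp.2 (some k) (some l) ++ "%"

-- word sets
theorem pv_mem_stringsA (sentences : List String) (x : String) :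
    x ∈ pvStringsA sentences ↔ pvWordIn sentences x := by
  have hstep : ∀ (st : List String) (sen : String) (x : String),
      x ∈ (PySem.Str.split₀ sen).foldl (fun st word => PySem.Set.add st word) st ↔
        x ∈ st ∨ x ∈ PySem.Str.split₀ sen := by
    intro st sen x
    rw [pv_mem_foldl (fun w z => z = w) _ (fun s a y => PySem.Set.mem_add s a y) _ st x]
    simp
  unfold pvStringsA pvWordIn
  rw [pv_mem_foldl _ _ hstep sentences PySem.Set.empty x]
  simp [PySem.Set.empty]

-- pair sets
theorem pv_mem_tuplesA (sentences : List String) (p : String × String) :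
    p ∈ pvTuplesA sentences ↔ ∃ sen ∈ sentences, pvPairCond sen p := by
  have hstep : ∀ (wt : List (String × String)) (sen : String) (p : String × String),
      p ∈ (PySem.List.pyRange 0 (PySem.Str.split₀ sen).length 1).foldl (fun wt i =>
            (PySem.List.pyRange (i+1) (PySem.Str.split₀ sen).length 1).foldl (fun wt j =>
              PySem.Set.add wt (PySem.List.pyGetD (PySem.Str.split₀ sen) i "",
                                PySem.List.pyGetD (PySem.Str.split₀ sen) j "")) wt) wt ↔
        p ∈ wt ∨ pvPairCond sen p := by
    intro wt sen p
    have hj : ∀ (i : Int) (wt : List (String × String)) (p : String × String),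
        p ∈ (PySem.List.pyRange (i+1) (PySem.Str.split₀ sen).length 1).foldl (fun wt j =>
              PySem.Set.add wt (PySem.List.pyGetD (PySem.Str.split₀ sen) i "",
                                PySem.List.pyGetD (PySem.Str.split₀ sen) j "")) wt ↔
          p ∈ wt ∨ ∃ j ∈ PySem.List.pyRange (i+1) (PySem.Str.split₀ sen).length 1,
            p = (PySem.List.pyGetD (PySem.Str.split₀ sen) i "",
                 PySem.List.pyGetD (PySem.Str.split₀ sen) j "") := by
      intro i wt p
      exact pv_mem_foldl
        (fun j q => q = (PySem.List.pyGetD (PySem.Str.split₀ sen) i "",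
                         PySem.List.pyGetD (PySem.Str.split₀ sen) j ""))
        (fun wt j => PySem.Set.add wt (PySem.List.pyGetD (PySem.Str.split₀ sen) i "",
                         PySem.List.pyGetD (PySem.Str.split₀ sen) j ""))
        (fun s j q => PySem.Set.mem_add s _ q) _ wt p
    rw [pv_mem_foldl _ _ (fun wt i q => hj i wt q) _ wt p]
    rfl
  unfold pvTuplesA
  rw [pv_mem_foldl _ _ hstep sentences PySem.Set.empty p]
  simp [PySem.Set.empty]

-- memberships of the four A-side pattern sets
theorem pv_mem_subA (S : List String) (mx : Option Int) (x : String) :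
    x ∈ pvSubA S mx ↔ ∃ w ∈ S, pvSubPat mx w x := by
  have hstep : ∀ (pats : List String) (w : String) (x : String),
      x ∈ (PySem.List.pyRange 0 (PySem.Str.len w) 1).foldl (fun pats i =>
            (PySem.List.pyRange (i+1) (PySem.Str.len w + 1) 1).foldl (fun pats j =>
              if pvCapSkip (j - i) mx then pats
              else PySem.Set.add pats ("%" ++ PySem.Str.slice w (some i) (some j) ++ "%")) pats) pats ↔
        x ∈ pats ∨ pvSubPat mx w x := by
    intro pats w x
    have hj : ∀ (i : Int) (pats : List String) (x : String),
        x ∈ (PySem.List.pyRange (i+1) (PySem.Str.len w + 1) 1).foldl (fun pats j =>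
              if pvCapSkip (j - i) mx then pats
              else PySem.Set.add pats ("%" ++ PySem.Str.slice w (some i) (some j) ++ "%")) pats ↔
          x ∈ pats ∨ ∃ j ∈ PySem.List.pyRange (i+1) (PySem.Str.len w + 1) 1,
            pvCapSkip (j - i) mx = false ∧
              x = "%" ++ PySem.Str.slice w (some i) (some j) ++ "%" := by
      intro i pats x
      exact pv_mem_foldl
        (fun j y => pvCapSkip (j - i) mx = false ∧
          y = "%" ++ PySem.Str.slice w (some i) (some j) ++ "%")
        (fun pats j => if pvCapSkip (j - i) mx then pats
          else PySem.Set.add pats ("%" ++ PySem.Str.slice w (some i) (some j) ++ "%"))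
        (fun s j y => pv_mem_if_skip _ s _ y) _ pats x
    rw [pv_mem_foldl _ _ (fun pats i y => hj i pats y) _ pats x]
    rfl
  unfold pvSubA
  rw [pv_mem_foldl _ _ hstep S PySem.Set.empty x]
  simp [PySem.Set.empty]

theorem pv_mem_prfA (S : List String) (mx : Option Int) (x : String) :
    x ∈ pvPrfA S mx ↔ ∃ w ∈ S, pvPrfPat mx w x := by
  have hstep : ∀ (pats : List String) (w : String) (x : String),
      x ∈ (PySem.List.pyRange 1 (PySem.Str.len w + 1) 1).foldl (fun pats i =>
            if pvCapSkip i mx then pats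
            else PySem.Set.add pats (PySem.Str.slice w none (some i) ++ "%")) pats ↔
        x ∈ pats ∨ pvPrfPat mx w x := by
    intro pats w x
    exact pv_mem_foldl
      (fun i y => pvCapSkip i mx = false ∧ y = PySem.Str.slice w none (some i) ++ "%")
      (fun pats i => if pvCapSkip i mx then pats
        else PySem.Set.add pats (PySem.Str.slice w none (some i) ++ "%"))
      (fun s i y => pv_mem_if_skip _ s _ y) _ pats x
  unfold pvPrfA
  rw [pv_mem_foldl _ _ hstep S PySem.Set.empty x]
  simp [PySem.Set.empty]

theorem pv_mem_sufA (S : List String) (mx : Option Int) (x : String) :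
    x ∈ pvSufA S mx ↔ ∃ w ∈ S, pvSufPat mx w x := by
  have hstep : ∀ (pats : List String) (w : String) (x : String),
      x ∈ (PySem.List.pyRange 1 (PySem.Str.len w + 1) 1).foldl (fun pats i =>
            if pvCapSkip i mx then pats
            else PySem.Set.add pats ("%" ++ PySem.Str.slice w (some (-i)) none)) pats ↔
        x ∈ pats ∨ pvSufPat mx w x := by
    intro pats w x
    exact pv_mem_foldl
      (fun i y => pvCapSkip i mx = false ∧ y = "%" ++ PySem.Str.slice w (some (-i)) none)
      (fun pats i => if pvCapSkip i mx then pats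
        else PySem.Set.add pats ("%" ++ PySem.Str.slice w (some (-i)) none))
      (fun s i y => pv_mem_if_skip _ s _ y) _ pats x
  unfold pvSufA
  rw [pv_mem_foldl _ _ hstep S PySem.Set.empty x]
  simp [PySem.Set.empty]

theorem pv_mem_pat3A (T : List (String × String)) (mx : Option Int) (x : String) :
    x ∈ pvPat3A T mx ↔ ∃ wp ∈ T, pvPairPat mx wp x := by
  have hstep : ∀ (pats : List String) (wp : String × String) (x : String),
      x ∈ (PySem.List.pyRange 0 (PySem.Str.len wp.1) 1).foldl (fun pats i =>
            (PySem.List.pyRange (i+1) (PySem.Str.len wp.1 + 1) 1).foldl (fun pats j =>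
              (PySem.List.pyRange 0 (PySem.Str.len wp.2) 1).foldl (fun pats k =>
                (PySem.List.pyRange (k+1) (PySem.Str.len wp.2 + 1) 1).foldl (fun pats l =>
                  if pvGtOpt ((j - i) + (l - k) + 3) mx then pats
                  else PySem.Set.add pats
                    ("%" ++ PySem.Str.slice wp.1 (some i) (some j) ++ "%" ++
                     PySem.Str.slice wp.2 (some k) (some l) ++ "%")) pats) pats) pats) pats ↔
        x ∈ pats ∨ pvPairPat mx wp x := by
    intro pats wp x
    have hl : ∀ (i j k : Int) (pats : List String) (x : String),
        x ∈ (PySem.List.pyRange (k+1) (PySem.Str.len wp.2 + 1) 1).foldl (fun pats l =>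
              if pvGtOpt ((j - i) + (l - k) + 3) mx then pats
              else PySem.Set.add pats
                ("%" ++ PySem.Str.slice wp.1 (some i) (some j) ++ "%" ++
                 PySem.Str.slice wp.2 (some k) (some l) ++ "%")) pats ↔
          x ∈ pats ∨ ∃ l ∈ PySem.List.pyRange (k+1) (PySem.Str.len wp.2 + 1) 1,
            pvGtOpt ((j - i) + (l - k) + 3) mx = false ∧
              x = "%" ++ PySem.Str.slice wp.1 (some i) (some j) ++ "%" ++
                   PySem.Str.slice wp.2 (some k) (some l) ++ "%" := by
      intro i j k pats x
      exact pv_mem_foldl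
        (fun l y => pvGtOpt ((j - i) + (l - k) + 3) mx = false ∧
          y = "%" ++ PySem.Str.slice wp.1 (some i) (some j) ++ "%" ++
               PySem.Str.slice wp.2 (some k) (some l) ++ "%")
        (fun pats l => if pvGtOpt ((j - i) + (l - k) + 3) mx then pats
          else PySem.Set.add pats
            ("%" ++ PySem.Str.slice wp.1 (some i) (some j) ++ "%" ++
             PySem.Str.slice wp.2 (some k) (some l) ++ "%"))
        (fun s l y => pv_mem_if_skip _ s _ y) _ pats x
    have hk : ∀ (i j : Int) (pats : List String) (x : String),
        x ∈ (PySem.List.pyRange 0 (PySem.Str.len wp.2) 1).foldl (fun pats k =>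
              (PySem.List.pyRange (k+1) (PySem.Str.len wp.2 + 1) 1).foldl (fun pats l =>
                if pvGtOpt ((j - i) + (l - k) + 3) mx then pats
                else PySem.Set.add pats
                  ("%" ++ PySem.Str.slice wp.1 (some i) (some j) ++ "%" ++
                   PySem.Str.slice wp.2 (some k) (some l) ++ "%")) pats) pats ↔
          x ∈ pats ∨ ∃ k ∈ PySem.List.pyRange 0 (PySem.Str.len wp.2) 1,
            ∃ l ∈ PySem.List.pyRange (k+1) (PySem.Str.len wp.2 + 1) 1,
              pvGtOpt ((j - i) + (l - k) + 3) mx = false ∧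
                x = "%" ++ PySem.Str.slice wp.1 (some i) (some j) ++ "%" ++
                     PySem.Str.slice wp.2 (some k) (some l) ++ "%" := by
      intro i j pats x
      exact pv_mem_foldl _ _ (fun s k y => hl i j k s y) _ pats x
    have hjj : ∀ (i : Int) (pats : List String) (x : String),
        x ∈ (PySem.List.pyRange (i+1) (PySem.Str.len wp.1 + 1) 1).foldl (fun pats j =>
              (PySem.List.pyRange 0 (PySem.Str.len wp.2) 1).foldl (fun pats k =>
                (PySem.List.pyRange (k+1) (PySem.Str.len wp.2 + 1) 1).foldl (fun pats l =>
                  if pvGtOpt ((j - i) + (l - k) + 3) mx then pats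
                  else PySem.Set.add pats
                    ("%" ++ PySem.Str.slice wp.1 (some i) (some j) ++ "%" ++
                     PySem.Str.slice wp.2 (some k) (some l) ++ "%")) pats) pats) pats ↔
          x ∈ pats ∨ ∃ j ∈ PySem.List.pyRange (i+1) (PySem.Str.len wp.1 + 1) 1,
            ∃ k ∈ PySem.List.pyRange 0 (PySem.Str.len wp.2) 1,
              ∃ l ∈ PySem.List.pyRange (k+1) (PySem.Str.len wp.2 + 1) 1,
                pvGtOpt ((j - i) + (l - k) + 3) mx = false ∧
                  x = "%" ++ PySem.Str.slice wp.1 (some i) (some j) ++ "%" ++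
                       PySem.Str.slice wp.2 (some k) (some l) ++ "%" := by
      intro i pats x
      exact pv_mem_foldl _ _ (fun s j y => hk i j s y) _ pats x
    rw [pv_mem_foldl _ _ (fun pats i y => hjj i pats y) _ pats x]
    rfl
  unfold pvPat3A
  rw [pv_mem_foldl _ _ hstep T PySem.Set.empty x]
  simp [PySem.Set.empty]

-- Nodup of the A-side pattern sets
theorem pv_nodup_subA (S : List String) (mx : Option Int) : (pvSubA S mx).Nodup := by
  unfold pvSubA
  apply pv_nodup_foldl
  · intro s w hs
    apply pv_nodup_foldl
    · intro s i hsi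
      apply pv_nodup_foldl
      · intro s j hsj
        exact pv_nodup_if_skip _ s _ hsj
      · exact hsi
    · exact hs
  · exact List.nodup_nil

theorem pv_nodup_prfA (S : List String) (mx : Option Int) : (pvPrfA S mx).Nodup := by
  unfold pvPrfA
  apply pv_nodup_foldl
  · intro s w hs
    apply pv_nodup_foldl
    · intro s i hsi
      exact pv_nodup_if_skip _ s _ hsi
    · exact hs
  · exact List.nodup_nil

theorem pv_nodup_sufA (S : List String) (mx : Option Int) : (pvSufA S mx).Nodup := by
  unfold pvSufA
  apply pv_nodup_foldl
  · intro s w hs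
    apply pv_nodup_foldl
    · intro s i hsi
      exact pv_nodup_if_skip _ s _ hsi
    · exact hs
  · exact List.nodup_nil

theorem pv_nodup_pat3A (T : List (String × String)) (mx : Option Int) : (pvPat3A T mx).Nodup := by
  unfold pvPat3A
  apply pv_nodup_foldl
  · intro s wp hs
    apply pv_nodup_foldl
    · intro s i hsi
      apply pv_nodup_foldl
      · intro s j hsj
        apply pv_nodup_foldl
        · intro s k hsk
          apply pv_nodup_foldl
          · intro s l hsl
            exact pv_nodup_if_skip _ s _ hsl
          · exact hsk
        · exact hsj
      · exact hsi
    · exact hs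
  · exact List.nodup_nil

-- sorted(setA) = sorted(setB) once both are Nodup with the same members
theorem pv_sorted_eq_of_set {s t : List String} (hs : s.Nodup) (ht : t.Nodup)
    (h : ∀ x, x ∈ s ↔ x ∈ t) :
    PySem.List.sorted s (fun x => x) false = PySem.List.sorted t (fun x => x) false := by
  apply PySem.List.sorted_eq_sorted_of_perm _ _ _ (fun a b hab => hab)
  exact (List.perm_ext_iff_of_nodup hs ht).2 h

-- ===== B-side lemmas =====

theorem pvOver_true_mono (m n : Int) (cap : Option Int) (hmn : m ≤ n)
    (h : pvOver m cap = true) : pvOver n cap = true := by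
  cases cap with
  | none => simp [pvOver] at h
  | some c => simp only [pvOver, decide_eq_true_eq] at h ⊢; omega

-- membership in the incremental prefix builder
theorem pv_mem_prefsB (cap : Option Int) (cs : List Char) :
    ∀ (acc x : List Char), x ∈ pvPrefsB cap acc cs ↔
      ∃ k : Nat, 1 ≤ k ∧ k ≤ cs.length ∧
        pvOver ((acc.length : Int) + (k : Int)) cap = false ∧ x = acc ++ cs.take k := by
  induction cs with
  | nil => intro acc x; simp [pvPrefsB]
  | cons c rest ih =>
    intro acc x
    by_cases hov : pvOver ((acc.length : Int) + 1) cap = true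
    · simp only [pvPrefsB, if_pos hov, List.not_mem_nil, false_iff]
      rintro ⟨k, hk1, _, hkov, _⟩
      have := pvOver_true_mono _ ((acc.length : Int) + (k : Int)) cap (by omega) hov
      rw [hkov] at this; exact Bool.false_ne_true this
    · have hov' : pvOver ((acc.length : Int) + 1) cap = false := by
        cases h : pvOver ((acc.length : Int) + 1) cap
        · rfl
        · exact absurd h hov
      simp only [pvPrefsB, if_neg hov, List.mem_cons]
      rw [ih (acc ++ [c]) x]
      constructor
      · rintro (rfl | ⟨k, hk1, hkle, hkov, rfl⟩)
        · exact ⟨1, le_refl 1, by simp, by simpa using hov', by simp⟩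
        · refine ⟨k + 1, by omega, by simpa using hkle, ?_, ?_⟩
          · have : ((acc ++ [c]).length : Int) + (k : Int) = (acc.length : Int) + ((k+1 : Nat) : Int) := by
              simp; ring
            rw [this] at hkov; exact hkov
          · simp [List.take_succ_cons]
      · rintro ⟨k, hk1, hkle, hkov, rfl⟩
        match k, hk1 with
        | 1, _ => left; simp
        | (k' + 2), _ =>
          right
          refine ⟨k' + 1, by omega, by simp at hkle; omega, ?_, ?_⟩
          · have : ((acc ++ [c]).length : Int) + ((k'+1 : Nat) : Int)
                = (acc.length : Int) + ((k'+2 : Nat) : Int) := by simp; ring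
            rw [this]; exact hkov
          · simp [List.take_succ_cons]

-- membership in the suffix-decomposition substring builder
theorem pv_mem_subsB (cap : Option Int) (w : List Char) (x : List Char) :
    x ∈ pvSubsB cap w ↔
      ∃ a k : Nat, a + k ≤ w.length ∧ 1 ≤ k ∧ pvOver (k : Int) cap = false ∧
        x = (w.drop a).take k := by
  induction w with
  | nil => simp [pvSubsB]
  | cons c rest ih =>
    simp only [pvSubsB, List.mem_append]
    rw [pv_mem_prefsB cap (c :: rest) [] x, ih]
    constructor
    · rintro (⟨k, hk1, hkle, hkov, rfl⟩ | ⟨a, k, hle, hk1, hkov, rfl⟩)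
      · exact ⟨0, k, by simpa using hkle, hk1, by simpa using hkov, by simp⟩
      · exact ⟨a + 1, k, by simp; omega, hk1, hkov, by simp⟩
    · rintro ⟨a, k, hle, hk1, hkov, rfl⟩
      cases a with
      | zero => exact Or.inl ⟨k, hk1, by simpa using hle, by simpa using hkov, by simp⟩
      | succ a' => exact Or.inr ⟨a', k, by simp at hle ⊢; omega, hk1, hkov, by simp⟩

-- membership in the right-to-left suffix builder
theorem pv_mem_sufsB_gen (cap : Option Int) (cs : List Char) :
    ∀ (acc x : List Char), x ∈ pvSufsB cap acc cs ↔
      ∃ k : Nat, 1 ≤ k ∧ k ≤ cs.length ∧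
        pvOver ((acc.length : Int) + (k : Int)) cap = false ∧
        x = (cs.take k).reverse ++ acc := by
  induction cs with
  | nil => intro acc x; simp [pvSufsB]
  | cons c rest ih =>
    intro acc x
    by_cases hov : pvOver ((acc.length : Int) + 1) cap = true
    · simp only [pvSufsB, if_pos hov, List.not_mem_nil, false_iff]
      rintro ⟨k, hk1, _, hkov, _⟩
      have := pvOver_true_mono _ ((acc.length : Int) + (k : Int)) cap (by omega) hov
      rw [hkov] at this; exact Bool.false_ne_true this
    · have hov' : pvOver ((acc.length : Int) + 1) cap = false := by
        cases h : pvOver ((acc.length : Int) + 1) cap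
        · rfl
        · exact absurd h hov
      simp only [pvSufsB, if_neg hov, List.mem_cons]
      rw [ih (c :: acc) x]
      constructor
      · rintro (rfl | ⟨k, hk1, hkle, hkov, rfl⟩)
        · exact ⟨1, le_refl 1, by simp, by simpa using hov', by simp⟩
        · refine ⟨k + 1, by omega, by simpa using hkle, ?_, ?_⟩
          · have : ((c :: acc).length : Int) + (k : Int) = (acc.length : Int) + ((k+1 : Nat) : Int) := by
              simp; ring
            rw [this] at hkov; exact hkov
          · simp [List.take_succ_cons]
      · rintro ⟨k, hk1, hkle, hkov, rfl⟩
        match k, hk1 with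
        | 1, _ => left; simp
        | (k' + 2), _ =>
          right
          refine ⟨k' + 1, by omega, by simp at hkle; omega, ?_, ?_⟩
          · have : ((c :: acc).length : Int) + ((k'+1 : Nat) : Int)
                = (acc.length : Int) + ((k'+2 : Nat) : Int) := by simp; ring
            rw [this]; exact hkov
          · simp [List.take_succ_cons]

theorem pv_mem_sufsB (cap : Option Int) (w : List Char) (x : List Char) :
    x ∈ pvSufsB cap [] w.reverse ↔
      ∃ k : Nat, 1 ≤ k ∧ k ≤ w.length ∧ pvOver (k : Int) cap = false ∧
        x = w.drop (w.length - k) := by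
  rw [pv_mem_sufsB_gen cap w.reverse [] x]
  constructor
  · rintro ⟨k, hk1, hkle, hkov, rfl⟩
    rw [List.length_reverse] at hkle
    refine ⟨k, hk1, hkle, by simpa using hkov, ?_⟩
    rw [List.take_reverse]; simp
  · rintro ⟨k, hk1, hkle, hkov, rfl⟩
    refine ⟨k, hk1, by simpa using hkle, by simpa using hkov, ?_⟩
    rw [List.take_reverse]; simp

-- slice-to-chars bridges
theorem pv_slice_chars (w : String) (i j : Int) (h0 : 0 ≤ i) (hij : i ≤ j)
    (hj : j ≤ (w.toList.length : Int)) :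
    PySem.Str.slice w (some i) (some j)
      = String.ofList ((w.toList.drop i.toNat).take (j.toNat - i.toNat)) := by
  simp only [PySem.Str.slice]
  rw [PySem.Chars.slice_eq_listSlice,
    PySem.List.slice_of_nonneg w.toList h0 (by omega) (by omega) hj]

theorem pv_slice_prefix (w : String) (i : Int) (h0 : 0 ≤ i) :
    PySem.Str.slice w none (some i) = String.ofList (w.toList.take i.toNat) := by
  simp only [PySem.Str.slice]
  rw [PySem.Chars.slice_eq_listSlice, PySem.List.slice_to w.toList h0]

theorem pv_slice_suffix (w : String) (i : Int) (h1 : 1 ≤ i) :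
    PySem.Str.slice w (some (-i)) none
      = String.ofList (w.toList.drop (w.toList.length - i.toNat)) := by
  simp only [PySem.Str.slice]
  rw [PySem.Chars.slice_eq_listSlice]
  have hk : -i = -((i.toNat : Nat) : Int) := by omega
  rw [hk, PySem.List.slice_from_neg_natCast w.toList i.toNat (by omega)]

-- per-word pattern conditions: A's index-loop form ↔ B's builder membership
theorem pv_sub_iff (mx : Option Int) (w x : String) :
    pvSubPat mx w x ↔ ∃ cs ∈ pvSubsB mx w.toList, x = "%" ++ String.ofList cs ++ "%" := by
  unfold pvSubPat
  constructor
  · rintro ⟨i, hi, j, hj, hskip, rfl⟩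
    have hib := PySem.List.mem_pyRange_one.1 hi
    have hjb := PySem.List.mem_pyRange_one.1 hj
    rw [PySem.Str.len_eq] at hib hjb
    refine ⟨(w.toList.drop i.toNat).take (j.toNat - i.toNat), ?_, ?_⟩
    · rw [pv_mem_subsB]
      refine ⟨i.toNat, j.toNat - i.toNat, by omega, by omega, ?_, rfl⟩
      have : ((j.toNat - i.toNat : Nat) : Int) = j - i := by omega
      rw [this]
      unfold pvCapSkip at hskip
      unfold pvOver
      exact hskip
    · rw [pv_slice_chars w i j (by omega) (by omega) (by omega)]
  · rintro ⟨cs, hcs, rfl⟩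
    rw [pv_mem_subsB] at hcs
    obtain ⟨a, k, hle, hk1, hkov, rfl⟩ := hcs
    refine ⟨(a : Int), ?_, ((a + k : Nat) : Int), ?_, ?_, ?_⟩
    · rw [PySem.List.mem_pyRange_one, PySem.Str.len_eq]; omega
    · rw [PySem.List.mem_pyRange_one, PySem.Str.len_eq]; push_cast; omega
    · have : ((a + k : Nat) : Int) - (a : Int) = (k : Int) := by omega
      rw [this]
      unfold pvCapSkip
      unfold pvOver at hkov
      exact hkov
    · rw [pv_slice_chars w (a : Int) ((a + k : Nat) : Int) (by omega) (by omega) (by omega)]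
      simp only [Int.toNat_natCast, Nat.add_sub_cancel_left]

theorem pv_prf_iff (mx : Option Int) (w x : String) :
    pvPrfPat mx w x ↔ ∃ cs ∈ pvPrefsB mx [] w.toList, x = String.ofList cs ++ "%" := by
  unfold pvPrfPat
  constructor
  · rintro ⟨i, hi, hskip, rfl⟩
    have hib := PySem.List.mem_pyRange_one.1 hi
    rw [PySem.Str.len_eq] at hib
    refine ⟨w.toList.take i.toNat, ?_, ?_⟩
    · rw [pv_mem_prefsB]
      refine ⟨i.toNat, by omega, by omega, ?_, by simp⟩
      have : (([] : List Char).length : Int) + ((i.toNat : Nat) : Int) = i := by simp; omega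
      rw [this]
      unfold pvCapSkip at hskip; unfold pvOver; exact hskip
    · rw [pv_slice_prefix w i (by omega)]
  · rintro ⟨cs, hcs, rfl⟩
    rw [pv_mem_prefsB] at hcs
    obtain ⟨k, hk1, hkle, hkov, rfl⟩ := hcs
    refine ⟨(k : Int), ?_, ?_, ?_⟩
    · rw [PySem.List.mem_pyRange_one, PySem.Str.len_eq]; omega
    · unfold pvCapSkip
      have : (([] : List Char).length : Int) + ((k : Nat) : Int) = (k : Int) := by simp
      rw [this] at hkov
      unfold pvOver at hkov; exact hkov
    · rw [pv_slice_prefix w (k : Int) (by omega)]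
      simp

theorem pv_suf_iff (mx : Option Int) (w x : String) :
    pvSufPat mx w x ↔ ∃ cs ∈ pvSufsB mx [] w.toList.reverse, x = "%" ++ String.ofList cs := by
  unfold pvSufPat
  constructor
  · rintro ⟨i, hi, hskip, rfl⟩
    have hib := PySem.List.mem_pyRange_one.1 hi
    rw [PySem.Str.len_eq] at hib
    refine ⟨w.toList.drop (w.toList.length - i.toNat), ?_, ?_⟩
    · rw [pv_mem_sufsB]
      refine ⟨i.toNat, by omega, by omega, ?_, rfl⟩
      have : ((i.toNat : Nat) : Int) = i := by omega
      rw [this]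
      unfold pvCapSkip at hskip; unfold pvOver; exact hskip
    · rw [pv_slice_suffix w i (by omega)]
  · rintro ⟨cs, hcs, rfl⟩
    rw [pv_mem_sufsB] at hcs
    obtain ⟨k, hk1, hkle, hkov, rfl⟩ := hcs
    refine ⟨(k : Int), ?_, ?_, ?_⟩
    · rw [PySem.List.mem_pyRange_one, PySem.Str.len_eq]; omega
    · unfold pvCapSkip; unfold pvOver at hkov; exact hkov
    · rw [pv_slice_suffix w (k : Int) (by omega)]
      simp

-- the pair condition for the some-case: A's combined filter ↔ B's two derived caps
theorem pv_pair_iff (m : Int) (wp : String × String) (x : String) :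
    pvPairPat (some m) wp x ↔
      ∃ s1 ∈ pvSubsB (some (m - 4)) wp.1.toList,
        ∃ s2 ∈ pvSubsB (some (m - 3 - (s1.length : Int))) wp.2.toList,
          x = "%" ++ String.ofList s1 ++ "%" ++ String.ofList s2 ++ "%" := by
  unfold pvPairPat
  constructor
  · rintro ⟨i, hi, j, hj, k, hk, l, hl, hskip, rfl⟩
    have hib := PySem.List.mem_pyRange_one.1 hi
    have hjb := PySem.List.mem_pyRange_one.1 hj
    have hkb := PySem.List.mem_pyRange_one.1 hk
    have hlb := PySem.List.mem_pyRange_one.1 hl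
    rw [PySem.Str.len_eq] at hib hjb
    rw [PySem.Str.len_eq] at hkb hlb
    simp only [pvGtOpt, decide_eq_false_iff_not, not_lt] at hskip
    refine ⟨(wp.1.toList.drop i.toNat).take (j.toNat - i.toNat), ?_,
            (wp.2.toList.drop k.toNat).take (l.toNat - k.toNat), ?_, ?_⟩
    · rw [pv_mem_subsB]
      refine ⟨i.toNat, j.toNat - i.toNat, by omega, by omega, ?_, rfl⟩
      simp only [pvOver, decide_eq_false_iff_not, not_lt]; omega
    · rw [pv_mem_subsB]
      refine ⟨k.toNat, l.toNat - k.toNat, by omega, by omega, ?_, rfl⟩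
      have hlen : (((wp.1.toList.drop i.toNat).take (j.toNat - i.toNat)).length : Int)
          = j - i := by
        simp only [List.length_take, List.length_drop]; omega
      rw [hlen]
      simp only [pvOver, decide_eq_false_iff_not, not_lt]; omega
    · rw [pv_slice_chars wp.1 i j (by omega) (by omega) (by omega),
          pv_slice_chars wp.2 k l (by omega) (by omega) (by omega)]
  · rintro ⟨s1, hs1, s2, hs2, rfl⟩
    rw [pv_mem_subsB] at hs1 hs2
    obtain ⟨a, k1, hle1, hk11, hov1, rfl⟩ := hs1
    obtain ⟨b, k2, hle2, hk21, hov2, rfl⟩ := hs2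
    simp only [pvOver, decide_eq_false_iff_not, not_lt] at hov1 hov2
    have hlen1 : ((wp.1.toList.drop a).take k1).length = k1 := by
      rw [List.length_take, List.length_drop]; omega
    rw [hlen1] at hov2
    refine ⟨(a : Int), ?_, ((a + k1 : Nat) : Int), ?_,
            (b : Int), ?_, ((b + k2 : Nat) : Int), ?_, ?_, ?_⟩
    · rw [PySem.List.mem_pyRange_one, PySem.Str.len_eq]; omega
    · rw [PySem.List.mem_pyRange_one, PySem.Str.len_eq]; push_cast; omega
    · rw [PySem.List.mem_pyRange_one, PySem.Str.len_eq]; omega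
    · rw [PySem.List.mem_pyRange_one, PySem.Str.len_eq]; push_cast; omega
    · simp only [pvGtOpt, decide_eq_false_iff_not, not_lt]; push_cast; omega
    · rw [pv_slice_chars wp.1 (a : Int) ((a + k1 : Nat) : Int) (by omega) (by omega) (by omega),
          pv_slice_chars wp.2 (b : Int) ((b + k2 : Nat) : Int) (by omega) (by omega) (by omega)]
      simp only [Int.toNat_natCast, Nat.add_sub_cancel_left]

-- the Nat form of the ordered-pair condition, shared target of both ports
def pvPairN (sen : String) (p : String × String) : Prop :=
  ∃ a b : Nat, a < b ∧ b < (PySem.Str.split₀ sen).length ∧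
    p = ((PySem.Str.split₀ sen).getD a "", (PySem.Str.split₀ sen).getD b "")

theorem pv_pairCond_iff (sen : String) (p : String × String) :
    pvPairCond sen p ↔ pvPairN sen p := by
  unfold pvPairCond pvPairN
  constructor
  · rintro ⟨i, hi, j, hj, rfl⟩
    have hib := PySem.List.mem_pyRange_one.1 hi
    have hjb := PySem.List.mem_pyRange_one.1 hj
    refine ⟨i.toNat, j.toNat, by omega, by omega, ?_⟩
    rw [PySem.List.pyGetD_eq_getElem _ "" (by omega) (by exact_mod_cast hib.2),
        PySem.List.pyGetD_eq_getElem _ "" (by omega) (by exact_mod_cast hjb.2),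
        List.getD_eq_getElem _ _ (by omega), List.getD_eq_getElem _ _ (by omega)]
  · rintro ⟨a, b, hab, hb, rfl⟩
    refine ⟨(a : Int), ?_, (b : Int), ?_, ?_⟩
    · rw [PySem.List.mem_pyRange_one]; omega
    · rw [PySem.List.mem_pyRange_one]; omega
    · rw [PySem.List.pyGetD_natCast, PySem.List.pyGetD_natCast]

-- membership in B's flat pair-pattern list
theorem pv_mem_patsPairB (sentences : List String) (mx : Option Int) (x : String) :
    x ∈ pvPatsPairB sentences mx ↔
      ∃ p : String × String, (∃ sen ∈ sentences, pvPairN sen p) ∧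
        ∃ s1 ∈ pvSubsB (mx.map (fun m => m - 4)) p.1.toList,
          ∃ s2 ∈ pvSubsB (mx.map (fun m => m - 3 - (s1.length : Int))) p.2.toList,
            x = "%" ++ String.ofList s1 ++ "%" ++ String.ofList s2 ++ "%" := by
  unfold pvPatsPairB
  simp only [List.mem_flatMap, List.mem_map]
  constructor
  · rintro ⟨sen, hsen, iw, hiw, w2, hw2, s1, hs1, s2, hs2, rfl⟩
    obtain ⟨k, hk, rfl⟩ := (PySem.List.mem_enumerate_iff _ _ _).1 hiw
    simp only [zero_add] at *
    have hcast : ((k : Int) + 1) = ((k + 1 : Nat) : Int) := by push_cast; ring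
    rw [hcast, PySem.List.slice_from_natCast] at hw2
    rw [List.mem_iff_getElem] at hw2
    obtain ⟨d, hd, hw2e⟩ := hw2
    rw [List.getElem_drop] at hw2e
    rw [List.length_drop] at hd
    refine ⟨((PySem.Str.split₀ sen)[k], w2), ⟨sen, hsen, k, k + 1 + d, by omega, by omega, ?_⟩,
            s1, hs1, s2, by rw [← hw2e] at hs2 ⊢; exact hs2, rfl⟩
    rw [← hw2e]
    congr 1 <;> rw [List.getD_eq_getElem _ _ (by omega)]
  · rintro ⟨p, ⟨sen, hsen, a, b, hab, hb, rfl⟩, s1, hs1, s2, hs2, rfl⟩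
    refine ⟨sen, hsen, ((a : Int), (PySem.Str.split₀ sen).getD a ""), ?_, (PySem.Str.split₀ sen).getD b "", ?_, s1, hs1, s2, hs2, rfl⟩
    · rw [PySem.List.mem_enumerate_iff _ _ _]
      refine ⟨a, by omega, ?_⟩
      rw [List.getD_eq_getElem _ _ (by omega)]
      simp
    · have hcast : ((a : Int) + 1) = ((a + 1 : Nat) : Int) := by push_cast; ring
      rw [hcast, PySem.List.slice_from_natCast]
      rw [List.getD_eq_getElem _ _ (by omega), List.mem_iff_getElem]
      exact ⟨b - (a + 1), by rw [List.length_drop]; omega,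
        by rw [List.getElem_drop]; congr 1; omega⟩

-- membership in B's flat single-pattern list
theorem pv_mem_patsSingleB (sentences : List String) (pt : String) (mx : Option Int) (x : String) :
    x ∈ pvPatsSingleB sentences pt mx ↔
      ∃ w, pvWordIn sentences w ∧
        x ∈ (if pt = "sub" then (pvSubsB mx w.toList).map (fun c => "%" ++ String.ofList c ++ "%")
             else if pt = "prf" then (pvPrefsB mx [] w.toList).map (fun p => String.ofList p ++ "%")
             else if pt = "suf" then (pvSufsB mx [] w.toList.reverse).map (fun s => "%" ++ String.ofList s)
             else []) := by
  unfold pvPatsSingleB pvWordIn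
  simp only [List.mem_flatMap]
  constructor
  · rintro ⟨sen, hsen, w, hw, hx⟩
    exact ⟨w, ⟨sen, hsen, hw⟩, hx⟩
  · rintro ⟨w, ⟨sen, hsen, hw⟩, hx⟩
    exact ⟨sen, hsen, w, hw, hx⟩

-- dict.fromkeys keeps a sublist (first occurrences in order)
theorem pv_foldl_add_sublist {α : Type} [BEq α] (xs : List α) :
    ∀ acc : List α, ∃ t, xs.foldl PySem.Set.add acc = acc ++ t ∧ t.Sublist xs := by
  induction xs with
  | nil => intro acc; exact ⟨[], by simp, List.Sublist.refl []⟩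
  | cons y ys ih =>
    intro acc
    obtain ⟨t, ht, hsub⟩ := ih (PySem.Set.add acc y)
    by_cases hc : PySem.Set.contains acc y = true
    · refine ⟨t, ?_, hsub.cons y⟩
      rw [List.foldl_cons, ht]
      unfold PySem.Set.add
      rw [if_pos hc]
    · refine ⟨y :: t, ?_, hsub.cons₂ y⟩
      rw [List.foldl_cons, ht]
      unfold PySem.Set.add
      rw [if_neg hc]
      simp

theorem pv_ofList_sublist {α : Type} [BEq α] (xs : List α) :
    (PySem.Set.ofList xs).Sublist xs := by
  obtain ⟨t, ht, hsub⟩ := pv_foldl_add_sublist xs []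
  unfold PySem.Set.ofList PySem.Set.empty
  rw [ht]
  simpa using hsub

-- list(dict.fromkeys(sorted(lst))) = sorted(set(lst))
theorem pv_uniq_eq (lst : List String) :
    pvUniqSorted lst = PySem.List.sorted (PySem.Set.ofList lst) (fun x => x) false := by
  unfold pvUniqSorted
  rw [PySem.List.dedup_eq_ofList]
  symm
  apply PySem.List.sorted_eq_of_perm_of_pairwise_lt
  · apply (List.perm_ext_iff_of_nodup (PySem.Set.nodup_ofList _) (PySem.Set.nodup_ofList _)).2
    intro x
    rw [PySem.Set.mem_ofList, PySem.Set.mem_ofList, PySem.List.mem_sorted]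
  · have hsub := pv_ofList_sublist (PySem.List.sorted lst (fun x => x) false)
    have hle : (PySem.Set.ofList (PySem.List.sorted lst (fun x => x) false)).Pairwise
        (fun a b : String => a ≤ b) :=
      (PySem.List.sorted_pairwise lst (fun x => x)).sublist hsub
    have hne : (PySem.Set.ofList (PySem.List.sorted lst (fun x => x) false)).Pairwise
        (fun a b : String => a ≠ b) := PySem.Set.nodup_ofList _
    exact (hle.and hne).imp (fun h => lt_of_le_of_ne h.1 h.2)

-- the four branch equalities
theorem pv_branch_sub (sentences : List String) (mx : Option Int) :
    PySem.List.sorted (pvSubA (pvStringsA sentences) mx) (fun x => x) false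
      = pvUniqSorted (pvPatsSingleB sentences "sub" mx) := by
  rw [pv_uniq_eq]
  apply pv_sorted_eq_of_set (pv_nodup_subA _ _) (PySem.Set.nodup_ofList _)
  intro x
  rw [pv_mem_subA, PySem.Set.mem_ofList, pv_mem_patsSingleB]
  simp only [String.reduceEq, reduceIte, List.mem_map]
  constructor
  · rintro ⟨w, hw, hp⟩
    rw [pv_mem_stringsA] at hw
    obtain ⟨cs, hcs, rfl⟩ := (pv_sub_iff mx w x).1 hp
    exact ⟨w, hw, cs, hcs, rfl⟩
  · rintro ⟨w, hw, cs, hcs, rfl⟩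
    exact ⟨w, (pv_mem_stringsA sentences w).2 hw, (pv_sub_iff mx w _).2 ⟨cs, hcs, rfl⟩⟩

theorem pv_branch_prf (sentences : List String) (mx : Option Int) :
    PySem.List.sorted (pvPrfA (pvStringsA sentences) mx) (fun x => x) false
      = pvUniqSorted (pvPatsSingleB sentences "prf" mx) := by
  rw [pv_uniq_eq]
  apply pv_sorted_eq_of_set (pv_nodup_prfA _ _) (PySem.Set.nodup_ofList _)
  intro x
  rw [pv_mem_prfA, PySem.Set.mem_ofList, pv_mem_patsSingleB]
  simp only [String.reduceEq, reduceIte, List.mem_map]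
  constructor
  · rintro ⟨w, hw, hp⟩
    rw [pv_mem_stringsA] at hw
    obtain ⟨cs, hcs, rfl⟩ := (pv_prf_iff mx w x).1 hp
    exact ⟨w, hw, cs, hcs, rfl⟩
  · rintro ⟨w, hw, cs, hcs, rfl⟩
    exact ⟨w, (pv_mem_stringsA sentences w).2 hw, (pv_prf_iff mx w _).2 ⟨cs, hcs, rfl⟩⟩

theorem pv_branch_suf (sentences : List String) (mx : Option Int) :
    PySem.List.sorted (pvSufA (pvStringsA sentences) mx) (fun x => x) false
      = pvUniqSorted (pvPatsSingleB sentences "suf" mx) := by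
  rw [pv_uniq_eq]
  apply pv_sorted_eq_of_set (pv_nodup_sufA _ _) (PySem.Set.nodup_ofList _)
  intro x
  rw [pv_mem_sufA, PySem.Set.mem_ofList, pv_mem_patsSingleB]
  simp only [String.reduceEq, reduceIte, List.mem_map]
  constructor
  · rintro ⟨w, hw, hp⟩
    rw [pv_mem_stringsA] at hw
    obtain ⟨cs, hcs, rfl⟩ := (pv_suf_iff mx w x).1 hp
    exact ⟨w, hw, cs, hcs, rfl⟩
  · rintro ⟨w, hw, cs, hcs, rfl⟩
    exact ⟨w, (pv_mem_stringsA sentences w).2 hw, (pv_suf_iff mx w _).2 ⟨cs, hcs, rfl⟩⟩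

theorem pv_branch_pair (sentences : List String) (mx : Option Int)
    (hnone : mx = none → ∀ s ∈ sentences, (PySem.Str.split₀ s).length ≤ 1) :
    PySem.List.sorted (pvPat3A (pvTuplesA sentences) mx) (fun x => x) false
      = pvUniqSorted (pvPatsPairB sentences mx) := by
  rw [pv_uniq_eq]
  apply pv_sorted_eq_of_set (pv_nodup_pat3A _ _) (PySem.Set.nodup_ofList _)
  intro x
  rw [pv_mem_pat3A, PySem.Set.mem_ofList, pv_mem_patsPairB]
  cases mx with
  | none =>
    constructor
    · rintro ⟨wp, hwp, hp⟩
      exfalso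
      obtain ⟨i, _, j, _, k, _, l, _, hskip, _⟩ := hp
      simp [pvGtOpt] at hskip
    · rintro ⟨p, ⟨sen, hsen, a, b, hab, hb, _⟩, _⟩
      exact absurd hb (by have := hnone rfl sen hsen; omega)
  | some m =>
    constructor
    · rintro ⟨wp, hwp, hp⟩
      rw [pv_mem_tuplesA] at hwp
      obtain ⟨sen, hsen, hpc⟩ := hwp
      obtain ⟨s1, hs1, s2, hs2, rfl⟩ := (pv_pair_iff m wp x).1 hp
      exact ⟨wp, ⟨sen, hsen, (pv_pairCond_iff sen wp).1 hpc⟩, s1, hs1, s2, hs2, rfl⟩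
    · rintro ⟨p, ⟨sen, hsen, hpn⟩, s1, hs1, s2, hs2, rfl⟩
      refine ⟨p, (pv_mem_tuplesA sentences p).2 ⟨sen, hsen, (pv_pairCond_iff sen p).2 hpn⟩, ?_⟩
      exact (pv_pair_iff m p _).2 ⟨s1, hs1, s2, hs2, rfl⟩

-- ===== VERDICT (by name: the statement is the Claim_ definition above) =====
theorem pattern_gen_spec : Claim_equal_pattern_gen := by
  intro sentences pat_type n_pat max_len _hdom hpre
  unfold Spec_pattern_gen pattern_gen pattern_gen_alt pattern_gen3
  by_cases h2 : n_pat = 2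
  · simp only [if_pos h2]
    exact pv_branch_pair sentences max_len (fun hn => (hpre h2).2 hn)
  · simp only [if_neg h2]
    by_cases hs : pat_type = "sub"
    · subst hs; exact pv_branch_sub sentences max_len
    · simp only [if_neg hs]
      by_cases hp : pat_type = "prf"
      · subst hp; exact pv_branch_prf sentences max_len
      · simp only [if_neg hp]
        by_cases hf : pat_type = "suf"
        · subst hf; exact pv_branch_suf sentences max_len
        · simp only [if_neg hf]
          rw [pv_uniq_eq]
          apply pv_sorted_eq_of_set List.nodup_nil (PySem.Set.nodup_ofList _)
          intro x
          rw [PySem.Set.mem_ofList, pv_mem_patsSingleB]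
          simp only [if_neg hs, if_neg hp, if_neg hf, List.not_mem_nil, false_iff]
          rintro ⟨w, _, h⟩
          exact h
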